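-- pv_equiv track=rewrite | github.com/WannaH4ppy/Python-Basics-Projects | Python/2/exc1.py | group_user_activity
-- ===== SOURCE A (Python) =====
-- def group_user_activity(x):
--     storage = {}
--
--     for i in x:
--         user, function = i.split("|")
--         #if user in storage:
--             #storage[user].append(function)
--          #else:
--             #storage[user] = []
--             #storage[user].append(function)
--         if user not in storage:
--             storage[user] = []
--
--         storage[user].append(function)
--         #above is better because we don't use storage[user] 3 times
--
--     return storage
-- ===== SOURCE B (Python) =====
-- def group_user_activity(x):
--     firsts = [i.split("|")[0] for i in x]
--     users = list(dict.fromkeys(firsts))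
--     return {u: [i.split("|")[1] for i in x if i.split("|")[0] == u] for u in users}
-- ===== Notes on version B (the rewrite author's own statement) =====
-- stated objective: alternative
-- what changed: B replaces A's single-pass dict-building loop (insert-empty-then-append) by a two-phase plan: ordered dedup of the user parts, then a dict comprehension that collects each user's functions with a filtered scan of the input.
import Mathlib
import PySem

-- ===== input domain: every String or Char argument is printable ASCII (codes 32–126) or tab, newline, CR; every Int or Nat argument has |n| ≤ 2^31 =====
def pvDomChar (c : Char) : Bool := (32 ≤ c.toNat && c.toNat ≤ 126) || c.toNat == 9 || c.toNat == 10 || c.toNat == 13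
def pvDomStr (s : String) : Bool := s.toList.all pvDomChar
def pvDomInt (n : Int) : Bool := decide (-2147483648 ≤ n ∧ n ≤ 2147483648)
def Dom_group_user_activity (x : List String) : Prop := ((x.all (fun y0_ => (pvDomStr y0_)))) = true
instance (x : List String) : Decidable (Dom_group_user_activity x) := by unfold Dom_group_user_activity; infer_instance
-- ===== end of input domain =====

-- B replaces A's single-pass dict loop by: ordered dedup of the user parts, then one filtered scan per user (alternative decomposition, not claimed faster).

-- i.split("|"): sep is the nonempty literal "|", so Python never raises here; split? is none only for an empty sep.
def pvSplit (i : String) : List String := (PySem.Str.split? i "|").getD []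

-- ===== PORT A =====
-- A: storage = {}; for i: user, function = i.split("|"); if user not in storage: storage[user]=[]; storage[user].append(function)
def group_user_activity (x : List String) : List (String × List String) :=
  (x.foldl (fun storage i =>
      match pvSplit i with
      | [user, function] =>
          let storage1 := if storage.contains user then storage else storage.insert user []
          storage1.modify user [] (fun l => l ++ [function])
      | _ => storage   -- Python raises ValueError here (unpacking ≠ 2 parts); excluded by Pre_
    ) (PySem.Dict.empty : PySem.Dict String (List String))).items

-- ===== PORT B =====
-- i.split("|")[0] / [1]: split is never empty so [0] never raises; [1] raises IndexError
-- only outside Pre_ — ported with the total pyGetD form.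
def pvFirst (i : String) : String := PySem.List.pyGetD (pvSplit i) 0 ""
def pvSecond (i : String) : String := PySem.List.pyGetD (pvSplit i) 1 ""
def group_user_activity_alt (x : List String) : List (String × List String) :=
  let firsts := x.map pvFirst
  let users := PySem.List.dedup firsts
  -- dict comprehension over the already-distinct users: its items list is this map
  users.map (fun u => (u, (x.filter (fun i => pvFirst i == u)).map pvSecond))

-- ===== PRECONDITION & SPEC =====
-- A raises ValueError when some entry does not split into exactly two parts (e.g. 'a', 'a|b|c'); those inputs are excluded.
def Pre_group_user_activity (x : List String) : Prop :=
  ∀ i ∈ x, (pvSplit i).length = 2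
instance (x : List String) : Decidable (Pre_group_user_activity x) := by unfold Pre_group_user_activity; infer_instance
def pvWitness_group_user_activity : List String := ["ann|read", "bob|run", "ann|eat"]
def Spec_group_user_activity (x : List String) (out : List (String × List String)) : Prop := out = group_user_activity_alt x
instance (x : List String) (out : List (String × List String)) : Decidable (Spec_group_user_activity x out) := by unfold Spec_group_user_activity; infer_instance

-- ===== CLAIM (what is proved, stated in full; the proofs are below) =====
def Claim_equal_group_user_activity : Prop := ∀ (x : List String), Dom_group_user_activity x → Pre_group_user_activity x → Spec_group_user_activity x (group_user_activity x)

-- ===== LEMMAS AND PROOFS =====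

-- Under Pre_, each entry splits exactly as [pvFirst i, pvSecond i].
lemma split_eq_pair (i : String) (h : (pvSplit i).length = 2) :
    pvSplit i = [pvFirst i, pvSecond i] := by
  unfold pvFirst pvSecond
  rcases hs : pvSplit i with _ | ⟨a, _ | ⟨b, _ | ⟨c, t⟩⟩⟩ <;>
    simp_all [PySem.List.pyGetD, PySem.List.pyGet?, PySem.List.pyIdx?]

-- A's insert-empty-then-append step is exactly a modify with default [].
lemma stepA_eq_modify (d : PySem.Dict String (List String)) (u f : String) :
    (if d.contains u then d else d.insert u []).modify u [] (fun l => l ++ [f]) =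
      d.modify u [] (fun l => l ++ [f]) := by
  by_cases hc : d.contains u
  · simp [hc]
  · simp [hc, PySem.Dict.modify, PySem.Dict.getD_insert_self,
      PySem.Dict.insert_insert_self,
      PySem.Dict.getD_of_not_contains d ([] : List String) (by simpa using hc)]

theorem group_user_activity_spec : Claim_equal_group_user_activity := by
  intro x _ hpre
  unfold Spec_group_user_activity group_user_activity group_user_activity_alt
  -- rewrite A's loop body into a plain modify over the (user, function) pair of each entry
  have hbody : x.foldl (fun storage i =>
      match pvSplit i with
      | [user, function] =>
          let storage1 := if storage.contains user then storage else storage.insert user []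
          storage1.modify user [] (fun l => l ++ [function])
      | _ => storage) (PySem.Dict.empty : PySem.Dict String (List String))
      = x.foldl (fun d i => d.modify (pvFirst i) [] (fun l => l ++ [pvSecond i]))
          PySem.Dict.empty := by
    apply PySem.List.foldl_congr_mem
    intro d i hi
    rw [split_eq_pair i (hpre i hi)]
    exact stepA_eq_modify d (pvFirst i) (pvSecond i)
  rw [hbody]
  set D := x.foldl (fun d i => d.modify (pvFirst i) [] (fun l => l ++ [pvSecond i]))
      (PySem.Dict.empty : PySem.Dict String (List String)) with hD
  have hnd : D.keys.Nodup := by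
    rw [hD]
    exact PySem.Dict.nodup_keys_foldl_modify_key x pvFirst []
      (fun _ i l => l ++ [pvSecond i]) PySem.Dict.empty
      (by simp [PySem.Dict.keys_empty])
  have hkeys : D.keys = PySem.List.dedup (x.map pvFirst) := by
    rw [hD, PySem.Dict.keys_foldl_modify_key x pvFirst [] (fun _ i l => l ++ [pvSecond i]),
      PySem.Dict.keys_empty, PySem.List.dedup_eq_ofList]
    rfl
  have hget : ∀ u, D.getD u [] = (x.filter (fun i => pvFirst i == u)).map pvSecond := by
    intro u
    have := PySem.Dict.getD_foldl_modify_append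
      (x.map (fun i => (pvFirst i, pvSecond i)))
      (PySem.Dict.empty : PySem.Dict String (List String)) u
    rw [List.foldl_map] at this
    simpa [hD, PySem.Dict.getD_empty, List.filter_map, Function.comp_def] using this
  rw [PySem.Dict.items_eq_map_keys D hnd [], hkeys]
  exact (List.map_congr_left (fun u _ => by rw [hget u])).symm
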